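-- pv_equiv track=rewrite | github.com/MCherry1/summers-ranch | .github/scripts/process_photos.py | pick_primary_photo
-- ===== SOURCE A (Python) =====
-- VIEW_TYPE_PRIORITY = {
--     "side-profile":  1,
--     "headshot":      2,
--     "rear":          3,
--     "three-quarter": 4,
--     "with-handler":  5,
--     "in-pasture":    6,
--     "group":         7,
--     "other":         8,
-- }
--
-- def pick_primary_photo(photos, photo_types, photo_dates, photo_quality=None):
--     """
--     Choose the best primary photo for an animal from the spec priority table:
--     most-recent side-profile > most-recent headshot > rear > three-quarter >
--     with-handler > in-pasture > group > other. Falls back to the first photo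
--     in the array when no types exist.
--
--     Quality-aware (docs/PHOTO-PIPELINE-SPEC.md § 4): photos rated "poor" are
--     skipped during selection. If every photo is rated "poor", we fall back to
--     the normal selection across them all (something has to represent the
--     animal). "fair"/"good"/"excellent" are treated equally — recency beats
--     quality in that range.
--
--     Tie-breaking rules (in order):
--       1. Lower priority value wins (side-profile beats headshot).
--       2. Within same priority, newer ISO date wins.
--       3. Within same priority + same (or missing) date, the earlier photo in
--          the array wins — this matches the spec's "fall back to the first
--          photo" rule when nothing discriminates.
--
--     Returns the chosen photo path, or None if there are no photos.
--     """
--     if not photos: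
--         return None
--
--     photo_quality = photo_quality or []
--
--     def priority_of(i):
--         vt = photo_types[i] if i < len(photo_types) else ""
--         return VIEW_TYPE_PRIORITY.get(vt, 99)
--
--     def date_of(i):
--         return photo_dates[i] if i < len(photo_dates) else ""
--
--     def is_poor(i):
--         q = photo_quality[i] if i < len(photo_quality) else ""
--         return q == "poor"
--
--     # First pass: candidates with quality != "poor"
--     candidates = [i for i in range(len(photos)) if not is_poor(i)]
--     # Fall back to all photos if everything is rated poor — we still need
--     # to show something.
--     if not candidates:
--         candidates = list(range(len(photos)))
--
--     best_i = candidates[0]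
--     for i in candidates[1:]:
--         p_i, p_best = priority_of(i), priority_of(best_i)
--         if p_i < p_best:
--             best_i = i
--         elif p_i == p_best:
--             d_i, d_best = date_of(i), date_of(best_i)
--             if d_i > d_best:
--                 best_i = i
--             # Equal priority AND equal/missing dates: keep the earlier index
--             # (the first-photo fallback). Do nothing.
--     return photos[best_i]
-- ===== SOURCE B (Python) =====
-- VIEW_TYPE_PRIORITY = {
--     "side-profile":  1,
--     "headshot":      2,
--     "rear":          3,
--     "three-quarter": 4,
--     "with-handler":  5,
--     "in-pasture":    6,
--     "group":         7,
--     "other":         8,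
-- }
--
-- def pick_primary_photo(photos, photo_types, photo_dates, photo_quality=None):
--     if not photos:
--         return None
--     photo_quality = photo_quality or []
--
--     def priority_of(i):
--         vt = photo_types[i] if i < len(photo_types) else ""
--         return VIEW_TYPE_PRIORITY.get(vt, 99)
--
--     def date_of(i):
--         return photo_dates[i] if i < len(photo_dates) else ""
--
--     def is_poor(i):
--         q = photo_quality[i] if i < len(photo_quality) else ""
--         return q == "poor"
--
--     candidates = [i for i in range(len(photos)) if not is_poor(i)] or list(range(len(photos)))
--
--     # Staged selection instead of one best-tracking scan:
--     # 1) the best (lowest) priority value present among the candidates,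
--     best_p = min(priority_of(i) for i in candidates)
--     # 2) the candidates achieving it,
--     pool = [i for i in candidates if priority_of(i) == best_p]
--     # 3) the newest date within that pool,
--     best_d = max(date_of(i) for i in pool)
--     # 4) the earliest photo in the pool carrying that date.
--     for i in pool:
--         if date_of(i) == best_d:
--             return photos[i]
-- ===== Notes on version B (the rewrite author's own statement) =====
-- stated objective: alternative
-- what changed: Replaced A's single best-tracking loop carrying a branch cascade by staged passes: compute the minimal priority value, filter the candidates down to that priority pool, compute the newest date in the pool, and return the first pool photo carrying it.
import Mathlib
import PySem

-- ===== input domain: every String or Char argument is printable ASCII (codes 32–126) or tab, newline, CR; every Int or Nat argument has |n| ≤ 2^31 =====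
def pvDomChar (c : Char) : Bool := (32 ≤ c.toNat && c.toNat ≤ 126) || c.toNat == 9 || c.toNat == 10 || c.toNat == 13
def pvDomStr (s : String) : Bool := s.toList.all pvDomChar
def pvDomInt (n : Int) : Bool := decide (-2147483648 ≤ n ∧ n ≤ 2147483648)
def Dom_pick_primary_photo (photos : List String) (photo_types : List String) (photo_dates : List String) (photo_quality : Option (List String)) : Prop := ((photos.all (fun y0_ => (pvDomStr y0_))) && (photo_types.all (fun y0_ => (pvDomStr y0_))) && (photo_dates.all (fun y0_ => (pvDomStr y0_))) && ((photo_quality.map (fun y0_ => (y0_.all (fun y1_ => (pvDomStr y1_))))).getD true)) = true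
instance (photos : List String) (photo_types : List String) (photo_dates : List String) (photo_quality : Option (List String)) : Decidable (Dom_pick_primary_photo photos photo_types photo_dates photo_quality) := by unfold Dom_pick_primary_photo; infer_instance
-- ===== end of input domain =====

-- B replaces A's single best-tracking loop by staged passes (min priority, then
-- filter, then max date, then first match); objective: alternative, same O(n).

-- ===== PORT A =====
-- shared constants/helpers: both Python files contain this exact code
def VIEW_TYPE_PRIORITY : PySem.Dict String Int :=
  PySem.Dict.ofList [("side-profile", 1), ("headshot", 2), ("rear", 3), ("three-quarter", 4),
    ("with-handler", 5), ("in-pasture", 6), ("group", 7), ("other", 8)]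

def ppPriorityOf (photo_types : List String) (i : Nat) : Int :=
  let vt := if i < photo_types.length then photo_types.getD i "" else ""
  PySem.Dict.getD VIEW_TYPE_PRIORITY vt 99

def ppDateOf (photo_dates : List String) (i : Nat) : String :=
  if i < photo_dates.length then photo_dates.getD i "" else ""

def ppIsPoor (pq : List String) (i : Nat) : Bool :=
  (if i < pq.length then pq.getD i "" else "") == "poor"

def pick_primary_photo (photos : List String) (photo_types : List String) (photo_dates : List String) (photo_quality : Option (List String)) : Option String :=
  if photos = [] then none
  else
    let pq := photo_quality.getD []      -- photo_quality or []
    let cand0 := (List.range photos.length).filter (fun i => !ppIsPoor pq i)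
    let candidates := if cand0 = [] then List.range photos.length else cand0
    match candidates with
    | [] => none        -- unreachable: candidates[0] exists since photos ≠ []
    | b :: rest =>
      let best := rest.foldl (fun best i =>
        if ppPriorityOf photo_types i < ppPriorityOf photo_types best then i
        else if ppPriorityOf photo_types i == ppPriorityOf photo_types best then
          (if ppDateOf photo_dates best < ppDateOf photo_dates i then i else best)
        else best) b
      PySem.List.pyGet? photos (best : Int)   -- return photos[best_i]

-- ===== PORT B =====
-- stage 3+4 of Source B: newest date in the pool, then the earliest photo carrying it
-- (the Python 'for … return' falls off the end returning None when nothing matches)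
def ppPick (photo_dates : List String) (pool : List Nat) : Option Nat :=
  match pool with
  | [] => none
  | p :: ps =>
    let best_d := ps.foldl (fun m i => max m (ppDateOf photo_dates i)) (ppDateOf photo_dates p)
    (p :: ps).find? (fun i => ppDateOf photo_dates i == best_d)

-- stages 1+2 of Source B: lowest priority value present, the pool achieving it
def ppSelect (photo_types : List String) (photo_dates : List String) (candidates : List Nat) : Option Nat :=
  match candidates with
  | [] => none
  | c :: cs =>
    let best_p := cs.foldl (fun m i => min m (ppPriorityOf photo_types i)) (ppPriorityOf photo_types c)
    ppPick photo_dates ((c :: cs).filter (fun i => ppPriorityOf photo_types i == best_p))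

def pick_primary_photo_alt (photos : List String) (photo_types : List String) (photo_dates : List String) (photo_quality : Option (List String)) : Option String :=
  if photos = [] then none
  else
    let pq := photo_quality.getD []
    let candidates :=
      let c := (List.range photos.length).filter (fun i => !ppIsPoor pq i)
      if c = [] then List.range photos.length else c
    match ppSelect photo_types photo_dates candidates with
    | some i => PySem.List.pyGet? photos (i : Int)
    | none => none

-- ===== PRECONDITION & SPEC =====
def Spec_pick_primary_photo (photos : List String) (photo_types : List String) (photo_dates : List String) (photo_quality : Option (List String)) (out : Option String) : Prop := out = pick_primary_photo_alt photos photo_types photo_dates photo_quality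
instance (photos : List String) (photo_types : List String) (photo_dates : List String) (photo_quality : Option (List String)) (out : Option String) : Decidable (Spec_pick_primary_photo photos photo_types photo_dates photo_quality out) := by unfold Spec_pick_primary_photo; infer_instance

-- ===== CLAIM (what is proved, stated in full; the proofs are below) =====
def Claim_equal_pick_primary_photo : Prop := ∀ (photos : List String) (photo_types : List String) (photo_dates : List String) (photo_quality : Option (List String)), Dom_pick_primary_photo photos photo_types photo_dates photo_quality → Spec_pick_primary_photo photos photo_types photo_dates photo_quality (pick_primary_photo photos photo_types photo_dates photo_quality)

-- ===== LEMMAS AND PROOFS =====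

-- A's loop step, named for the proofs
def ppStep (pt pd : List String) (best i : Nat) : Nat :=
  if ppPriorityOf pt i < ppPriorityOf pt best then i
  else if ppPriorityOf pt i == ppPriorityOf pt best then
    (if ppDateOf pd best < ppDateOf pd i then i else best)
  else best

lemma ppSelect_cons (pt pd : List String) (c : Nat) (cs : List Nat) :
    ppSelect pt pd (c :: cs) =
      ppPick pd ((c :: cs).filter (fun i => ppPriorityOf pt i ==
        cs.foldl (fun m i => min m (ppPriorityOf pt i)) (ppPriorityOf pt c))) := rfl

lemma foldl_min_le (pt : List String) (l : List Nat) (a : Int) :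
    l.foldl (fun m i => min m (ppPriorityOf pt i)) a ≤ a := by
  induction l generalizing a with
  | nil => exact le_rfl
  | cons x xs ih =>
    simpa using le_trans (ih (min a (ppPriorityOf pt x))) (min_le_left _ _)

lemma le_foldl_max (pd : List String) (l : List Nat) (a : String) :
    a ≤ l.foldl (fun m i => max m (ppDateOf pd i)) a := by
  induction l generalizing a with
  | nil => exact le_rfl
  | cons x xs ih =>
    simpa using le_trans (le_max_left a (ppDateOf pd x)) (ih (max a (ppDateOf pd x)))

lemma ppPick_drop_head (pd : List String) (b x : Nat) (l : List Nat)
    (h : ppDateOf pd b < ppDateOf pd x) :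
    ppPick pd (b :: x :: l) = ppPick pd (x :: l) := by
  simp only [ppPick, List.foldl_cons, max_eq_right h.le]
  have hxd := le_foldl_max pd l (ppDateOf pd x)
  set bd := l.foldl (fun m i => max m (ppDateOf pd i)) (ppDateOf pd x) with hbddef
  have hb : ¬ ((fun i => ppDateOf pd i == bd) b = true) := by
    simp only [beq_iff_eq]
    exact fun hEq => absurd (hEq ▸ hxd) (not_le.mpr h)
  rw [List.find?_cons_of_neg (p := fun i => ppDateOf pd i == bd) hb]

lemma ppPick_drop_second (pd : List String) (b x : Nat) (l : List Nat)
    (h : ppDateOf pd x ≤ ppDateOf pd b) :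
    ppPick pd (b :: x :: l) = ppPick pd (b :: l) := by
  simp only [ppPick, List.foldl_cons, max_eq_left h]
  have hbd := le_foldl_max pd l (ppDateOf pd b)
  set bd := l.foldl (fun m i => max m (ppDateOf pd i)) (ppDateOf pd b) with hbddef
  by_cases hb : ppDateOf pd b = bd
  · rw [List.find?_cons_of_pos (p := fun i => ppDateOf pd i == bd)
          (by simp only [beq_iff_eq]; exact hb),
        List.find?_cons_of_pos (p := fun i => ppDateOf pd i == bd)
          (by simp only [beq_iff_eq]; exact hb)]
  · have hnb : ¬ ((fun i => ppDateOf pd i == bd) b = true) := by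
      simp only [beq_iff_eq]; exact hb
    have hnx : ¬ ((fun i => ppDateOf pd i == bd) x = true) := by
      simp only [beq_iff_eq]
      exact fun hEq => hb (le_antisymm hbd (hEq ▸ h))
    rw [List.find?_cons_of_neg (p := fun i => ppDateOf pd i == bd) hnb,
        List.find?_cons_of_neg (p := fun i => ppDateOf pd i == bd) hnx,
        List.find?_cons_of_neg (p := fun i => ppDateOf pd i == bd) hnb]

lemma select_cons_cons (pt pd : List String) (b x : Nat) (xs : List Nat) :
    ppSelect pt pd (b :: x :: xs) = ppSelect pt pd (ppStep pt pd b x :: xs) := by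
  by_cases h1 : ppPriorityOf pt x < ppPriorityOf pt b
  · -- winner is x; b cannot reach the minimal priority
    have hw : ppStep pt pd b x = x := by simp [ppStep, h1]
    rw [hw]
    simp only [ppSelect_cons, List.foldl_cons, min_eq_right h1.le]
    have hle := foldl_min_le pt xs (ppPriorityOf pt x)
    have fb : (ppPriorityOf pt b == xs.foldl (fun m i => min m (ppPriorityOf pt i)) (ppPriorityOf pt x)) = false := by
      rw [beq_eq_false_iff_ne]
      omega
    simp [List.filter_cons, fb]
  · by_cases h2 : ppPriorityOf pt x = ppPriorityOf pt b
    · have hmin : min (ppPriorityOf pt b) (ppPriorityOf pt x) = ppPriorityOf pt b := by omega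
      have hxb : ∀ z : Int, (ppPriorityOf pt x == z) = (ppPriorityOf pt b == z) := by
        intro z; rw [h2]
      by_cases h3 : ppDateOf pd b < ppDateOf pd x
      · -- winner is x: same priority, strictly newer date
        have hw : ppStep pt pd b x = x := by simp [ppStep, h2, h3]
        rw [hw]
        simp only [ppSelect_cons, List.foldl_cons, h2, min_self]
        by_cases hpb : ppPriorityOf pt b = xs.foldl (fun m i => min m (ppPriorityOf pt i)) (ppPriorityOf pt b)
        · have t1 := beq_iff_eq.mpr hpb
          simp only [List.filter_cons, hxb, t1, if_true]
          exact ppPick_drop_head pd b x _ h3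
        · have t1 := beq_eq_false_iff_ne.mpr hpb
          simp [hxb, t1]
      · -- winner stays b: same priority, date not newer
        have hw : ppStep pt pd b x = b := by simp [ppStep, h2, h3]
        rw [hw]
        simp only [ppSelect_cons, List.foldl_cons, h2, min_self]
        by_cases hpb : ppPriorityOf pt b = xs.foldl (fun m i => min m (ppPriorityOf pt i)) (ppPriorityOf pt b)
        · have t1 := beq_iff_eq.mpr hpb
          simp only [List.filter_cons, hxb, t1, if_true]
          exact ppPick_drop_second pd b x _ (not_lt.mp h3)
        · have t1 := beq_eq_false_iff_ne.mpr hpb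
          simp [hxb, t1]
    · -- winner stays b; x cannot reach the minimal priority
      have hbx : ppPriorityOf pt b < ppPriorityOf pt x := by
        rcases lt_or_eq_of_le (not_lt.mp h1) with h | h
        · exact h
        · exact absurd h.symm h2
      have hw : ppStep pt pd b x = b := by
        simp [ppStep, h1, (by simpa using h2 : (ppPriorityOf pt x == ppPriorityOf pt b) = false)]
      rw [hw]
      simp only [ppSelect_cons, List.foldl_cons, min_eq_left hbx.le]
      have hle := foldl_min_le pt xs (ppPriorityOf pt b)
      have fx : (ppPriorityOf pt x == xs.foldl (fun m i => min m (ppPriorityOf pt i)) (ppPriorityOf pt b)) = false := by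
        rw [beq_eq_false_iff_ne]
        omega
      simp [List.filter_cons, fx]

lemma select_eq_fold (pt pd : List String) (l : List Nat) (b : Nat) :
    ppSelect pt pd (b :: l) = some (l.foldl (ppStep pt pd) b) := by
  induction l generalizing b with
  | nil => simp [ppSelect, ppPick]
  | cons x xs ih =>
    rw [select_cons_cons, List.foldl_cons]
    exact ih (ppStep pt pd b x)

-- ===== VERDICT (by name: the statement is the Claim_ definition above) =====
theorem pick_primary_photo_spec : Claim_equal_pick_primary_photo := by
  intro photos pt pd pq _
  unfold Spec_pick_primary_photo pick_primary_photo pick_primary_photo_alt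
  by_cases h : photos = []
  · simp [h]
  · simp only [h, if_false]
    set candidates :=
      (let c := (List.range photos.length).filter (fun i => !ppIsPoor (pq.getD []) i)
       if c = [] then List.range photos.length else c) with hcand
    match candidates with
    | [] => simp [ppSelect]
    | b :: rest =>
      rw [select_eq_fold pt pd rest b]
      rfl
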